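-- pv_equiv track=rewrite | github.com/noiehoie/gpucall | sdk/python/gpucall_recipe_draft/core.py | _round_context_budget
-- ===== SOURCE A (Python) =====
-- from typing import Any
--
-- def _round_context_budget(value: Any) -> int:
--     try:
--         required = int(value)
--     except (TypeError, ValueError):
--         required = 8192
--     for candidate in (8192, 32768, 65536, 131072, 262144, 524288, 1048576):
--         if required <= candidate:
--             return candidate
--     return required
-- ===== SOURCE B (Python) =====
-- def _round_context_budget(value):
--     try:
--         required = int(value)
--     except (TypeError, ValueError):
--         required = 8192
--     if required <= 8192:
--         return 8192
--     if required > 1048576: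
--         return required
--     # tiers between 8192 and 1048576 are exactly the powers of two >= 32768
--     return max(32768, 1 << (required - 1).bit_length())
-- ===== Notes on version B (the rewrite author's own statement) =====
-- stated objective: alternative
-- what changed: replaces the linear scan over the tier table with a closed-form computation: clamp at the lowest and highest tiers and otherwise round up to the next power of two (with the second tier as floor) via bit_length, so the table disappears entirely
import Mathlib
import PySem

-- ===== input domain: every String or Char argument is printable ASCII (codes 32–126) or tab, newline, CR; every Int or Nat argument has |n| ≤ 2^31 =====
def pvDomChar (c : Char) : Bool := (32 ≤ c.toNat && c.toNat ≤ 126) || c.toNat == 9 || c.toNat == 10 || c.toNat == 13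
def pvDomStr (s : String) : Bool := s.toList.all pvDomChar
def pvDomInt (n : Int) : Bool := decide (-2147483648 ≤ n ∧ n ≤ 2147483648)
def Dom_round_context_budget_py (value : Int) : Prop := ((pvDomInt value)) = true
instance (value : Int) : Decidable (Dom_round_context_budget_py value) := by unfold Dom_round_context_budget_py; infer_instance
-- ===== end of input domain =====

-- B replaces A's linear scan over the tier table with a closed-form bit-length
-- computation (clamp, then next power of two with a 32768 floor): alternative algorithm.


-- ===== PORT A =====
-- int(value) on an Int argument is the identity, so the try/except never fires.
-- the for-loop with early return over the literal tier tuple: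
def pvLoopA (tiers : List Int) (required : Int) : Int :=
  match tiers with
  | [] => required
  | candidate :: rest => if required ≤ candidate then candidate else pvLoopA rest required

def round_context_budget_py (value : Int) : Int :=
  pvLoopA [8192, 32768, 65536, 131072, 262144, 524288, 1048576] value

-- ===== PORT B =====
-- Python's n.bit_length() for n ≥ 0 (only called with n ≥ 8192 here)
def pvBitLength (n : Nat) : Nat :=
  if n = 0 then 0 else pvBitLength (n / 2) + 1
decreasing_by exact Nat.div_lt_self (Nat.pos_of_ne_zero (by assumption)) (by omega)

def round_context_budget_py_alt (value : Int) : Int :=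
  let required := value   -- int(value) is the identity on Int
  if required ≤ 8192 then 8192
  else if required > 1048576 then required
  else max 32768 ((2 : Int) ^ pvBitLength (required - 1).toNat)  -- 1 << k = 2^k; required-1 > 0 here

-- ===== PRECONDITION & SPEC =====
def Spec_round_context_budget_py (value : Int) (out : Int) : Prop := out = round_context_budget_py_alt value
instance (value : Int) (out : Int) : Decidable (Spec_round_context_budget_py value out) := by unfold Spec_round_context_budget_py; infer_instance

-- ===== CLAIM (what is proved, stated in full; the proofs are below) =====
def Claim_equal_round_context_budget_py : Prop := ∀ (value : Int), Dom_round_context_budget_py value → Spec_round_context_budget_py value (round_context_budget_py value)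

-- ===== LEMMAS AND PROOFS =====

-- characterisation of bit_length on the interval [2^k, 2^(k+1))
theorem pvBitLength_eq (k : Nat) : ∀ n : Nat, 2 ^ k ≤ n → n < 2 ^ (k + 1) → pvBitLength n = k + 1 := by
  induction k with
  | zero =>
    intro n h1 h2
    have : n = 1 := by omega
    subst this
    simp [pvBitLength]
  | succ k ih =>
    intro n h1 h2
    have hpow : 2 ^ (k + 1) = 2 * 2 ^ k := by ring
    have hpow2 : 2 ^ (k + 1 + 1) = 2 * 2 ^ (k + 1) := by ring
    have hk : 0 < 2 ^ k := by positivity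
    have hn : n ≠ 0 := by omega
    rw [pvBitLength]
    simp only [hn, if_false]
    rw [ih (n / 2) (by omega) (by omega)]

-- ===== VERDICT (by name: the statement is the Claim_ definition above) =====
theorem round_context_budget_py_spec : Claim_equal_round_context_budget_py := by
  intro v _
  unfold Spec_round_context_budget_py round_context_budget_py round_context_budget_py_alt
  simp only [pvLoopA]
  by_cases h0 : v ≤ 8192
  · simp [h0]
  by_cases hBig : v > 1048576
  · simp [h0, hBig]
    omega
  have hbl : ∀ k : Nat, (2 : Int) ^ k < v → v ≤ (2 : Int) ^ (k + 1) → pvBitLength (v - 1).toNat = k + 1 := by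
    intro k h1 h2
    have hc : ((2 : Int)) ^ k = ((2 ^ k : Nat) : Int) := by push_cast; ring
    have hc2 : ((2 : Int)) ^ (k + 1) = ((2 ^ (k + 1) : Nat) : Int) := by push_cast; ring
    exact pvBitLength_eq k (v - 1).toNat (by omega) (by omega)
  by_cases h1 : v ≤ 16384
  · rw [hbl 13 (by norm_num; omega) (by norm_num; omega)]
    norm_num
    split_ifs <;> omega
  by_cases h2 : v ≤ 32768
  · rw [hbl 14 (by norm_num; omega) (by norm_num; omega)]
    norm_num
    split_ifs <;> omega
  by_cases h3 : v ≤ 65536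
  · rw [hbl 15 (by norm_num; omega) (by norm_num; omega)]
    norm_num
    split_ifs <;> omega
  by_cases h4 : v ≤ 131072
  · rw [hbl 16 (by norm_num; omega) (by norm_num; omega)]
    norm_num
    split_ifs <;> omega
  by_cases h5 : v ≤ 262144
  · rw [hbl 17 (by norm_num; omega) (by norm_num; omega)]
    norm_num
    split_ifs <;> omega
  by_cases h6 : v ≤ 524288
  · rw [hbl 18 (by norm_num; omega) (by norm_num; omega)]
    norm_num
    split_ifs <;> omega
  · rw [hbl 19 (by norm_num; omega) (by norm_num; omega)]
    norm_num
    split_ifs <;> omega
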